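-- pv_equiv track=rewrite | github.com/SantiagoRR2004/APAU_II-FineTuning | main.py | divideSentences
-- ===== SOURCE A (Python) =====
-- from typing import List, Tuple
--
-- def divideSentences(
--     sentences: List[List[Tuple[str, str]]],
-- ) -> Tuple[List[List[Tuple[str, str]]], List[List[Tuple[str, str]]]]:
--     """
--     Divide the sentences into two parts based on the given percentage.
--
--     Args:
--         - sentences (List[List[Tuple[str, str]]]): A list of sentences, where each sentence is a list of tuples.
--
--     Returns:
--         - Tuple[List[List[Tuple[str, str]]], List[List[Tuple[str, str]]]]: Two lists of sentences.
--     """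
--     index = 0
--
--     # Calculate the index to split the sentences
--     for _, sentence in enumerate(sentences):
--         for _, token in enumerate(sentence):
--             if len(token) > 1:
--                 index += 1
--             else:
--                 break
--
--     # Split the sentences into two parts
--     sentences1 = []
--     sentences2 = []
--     for _, sentence in enumerate(sentences):
--         if index > 0:
--             sentences1.append(sentence)
--             index -= len(sentence)
--         else:
--             sentences2.append(sentence)
--     return sentences1, sentences2
-- ===== SOURCE B (Python) =====
-- from typing import List, Tuple
--
-- def divideSentences(
--     sentences: List[List[Tuple[str, str]]],
-- ) -> Tuple[List[List[Tuple[str, str]]], List[List[Tuple[str, str]]]]: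
--     # Total token count (each token is a (word, tag) pair, so len(token) == 2 > 1
--     # always holds and A's per-sentence break never fires before the end).
--     index = sum(len(s) for s in sentences)
--     # Cutoff k: number of sentences whose cumulative length BEFORE them is < index.
--     k = 0
--     run = 0
--     for s in sentences:
--         if run >= index:
--             break
--         k += 1
--         run += len(s)
--     return sentences[:k], sentences[k:]
-- ===== Notes on version B (the rewrite author's own statement) =====
-- stated objective: simpler
-- what changed: Replaced A's nested count-with-break plus running-budget append loop by a total-token sum, a single prefix-sum scan for the cutoff index, and two slices.
import Mathlib
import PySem

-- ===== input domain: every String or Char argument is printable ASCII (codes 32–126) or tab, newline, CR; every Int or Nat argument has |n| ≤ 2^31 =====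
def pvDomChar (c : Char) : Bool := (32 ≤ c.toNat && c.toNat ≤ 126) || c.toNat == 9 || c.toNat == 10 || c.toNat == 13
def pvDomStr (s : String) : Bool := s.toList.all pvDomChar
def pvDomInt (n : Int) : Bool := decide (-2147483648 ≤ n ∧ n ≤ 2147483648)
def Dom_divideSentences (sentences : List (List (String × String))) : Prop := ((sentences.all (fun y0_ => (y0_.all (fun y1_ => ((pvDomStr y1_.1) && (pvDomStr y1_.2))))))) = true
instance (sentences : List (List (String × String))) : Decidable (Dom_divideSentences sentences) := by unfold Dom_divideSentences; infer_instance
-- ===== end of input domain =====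

-- B replaces A's nested count-with-break and running-budget append loop by a total
-- token sum, a prefix-sum cutoff scan and two slices (objective: simpler).


-- ===== PORT A =====
-- len(token) for token a 2-tuple (String × String) is 2 in Python
def pvTupLen (_ : String × String) : Int := 2

-- inner loop of A: count leading tokens with len > 1, stopping at the break
def pvCountSent (sentence : List (String × String)) (i : Int) : Int :=
  match sentence with
  | [] => i
  | t :: rest => if pvTupLen t > 1 then pvCountSent rest (i + 1) else i

-- outer counting loop of A
def pvCountA (sentences : List (List (String × String))) (i : Int) : Int :=
  match sentences with
  | [] => i
  | s :: rest => pvCountA rest (pvCountSent s i)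

-- splitting loop of A: running budget, append to sentences1 while index > 0
def pvSplitA (sentences : List (List (String × String))) (index : Int) :
    (List (List (String × String))) × (List (List (String × String))) :=
  match sentences with
  | [] => ([], [])
  | s :: rest =>
      if index > 0 then
        let r := pvSplitA rest (index - (s.length : Int))
        (s :: r.1, r.2)
      else
        let r := pvSplitA rest index
        (r.1, s :: r.2)

def divideSentences (sentences : List (List (String × String))) : (List (List (String × String))) × (List (List (String × String))) :=
  -- index: for each sentence, count leading tokens with len(token) > 1 (a token is a
  -- 2-tuple, so len(token) = 2 and the break branch is never taken).
  let index := pvCountA sentences 0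
  pvSplitA sentences index


-- ===== PORT B =====
-- B: cutoff k = number of sentences whose cumulative length before them is < index
def pvFindK (sentences : List (List (String × String))) (run index : Int) : Nat :=
  match sentences with
  | [] => 0
  | s :: rest => if run ≥ index then 0 else 1 + pvFindK rest (run + (s.length : Int)) index

def divideSentences_alt (sentences : List (List (String × String))) : (List (List (String × String))) × (List (List (String × String))) :=
  let index : Int := sentences.foldl (fun a s => a + (s.length : Int)) 0
  let k := pvFindK sentences 0 index
  -- sentences[:k], sentences[k:] with 0 ≤ k = take/drop
  (sentences.take k, sentences.drop k)


-- ===== PRECONDITION & SPEC =====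
def Spec_divideSentences (sentences : List (List (String × String))) (out : (List (List (String × String))) × (List (List (String × String)))) : Prop := out = divideSentences_alt sentences
instance (sentences : List (List (String × String))) (out : (List (List (String × String))) × (List (List (String × String)))) : Decidable (Spec_divideSentences sentences out) := by unfold Spec_divideSentences; infer_instance

-- ===== CLAIM (what is proved, stated in full; the proofs are below) =====
def Claim_equal_divideSentences : Prop := ∀ (sentences : List (List (String × String))), Dom_divideSentences sentences → Spec_divideSentences sentences (divideSentences sentences)

-- ===== LEMMAS AND PROOFS =====


-- kOf: abstract cutoff shared by both readings of the split
def pvKOf (sentences : List (List (String × String))) (idx : Int) : Nat :=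
  match sentences with
  | [] => 0
  | s :: rest => if idx > 0 then 1 + pvKOf rest (idx - (s.length : Int)) else 0

theorem pvCountSent_eq (s : List (String × String)) (i : Int) :
    pvCountSent s i = i + (s.length : Int) := by
  induction s generalizing i with
  | nil => simp [pvCountSent]
  | cons t rest ih =>
      simp [pvCountSent, pvTupLen, ih]
      ring

theorem pvFoldlSum_shift (xs : List (List (String × String))) (j : Int) :
    xs.foldl (fun a s => a + (s.length : Int)) j
      = j + xs.foldl (fun a s => a + (s.length : Int)) 0 := by
  induction xs generalizing j with
  | nil => simp
  | cons b bs ihb =>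
      simp only [List.foldl_cons]
      rw [ihb (j + (b.length : Int)), ihb (0 + (b.length : Int))]
      ring

theorem pvCountA_eq (xs : List (List (String × String))) (i : Int) :
    pvCountA xs i = i + xs.foldl (fun a s => a + (s.length : Int)) 0 := by
  induction xs generalizing i with
  | nil => simp [pvCountA]
  | cons s rest ih =>
      simp only [pvCountA, List.foldl_cons, ih, pvCountSent_eq]
      rw [pvFoldlSum_shift rest (0 + (s.length : Int))]
      ring

theorem pvSplitA_nonpos (xs : List (List (String × String))) (idx : Int) (h : ¬ idx > 0) :
    pvSplitA xs idx = ([], xs) := by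
  induction xs with
  | nil => simp [pvSplitA]
  | cons s rest ih => simp [pvSplitA, h, ih]

theorem pvSplitA_eq_kOf (xs : List (List (String × String))) (idx : Int) :
    pvSplitA xs idx = (xs.take (pvKOf xs idx), xs.drop (pvKOf xs idx)) := by
  induction xs generalizing idx with
  | nil => simp [pvSplitA, pvKOf]
  | cons s rest ih =>
      by_cases h : idx > 0
      · simp [pvSplitA, pvKOf, h, ih, Nat.add_comm 1]
      · simp [pvSplitA, pvKOf, h, pvSplitA_nonpos rest idx h]

theorem pvFindK_eq_kOf (xs : List (List (String × String))) (run index : Int) :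
    pvFindK xs run index = pvKOf xs (index - run) := by
  induction xs generalizing run with
  | nil => simp [pvFindK, pvKOf]
  | cons s rest ih =>
      by_cases h : run ≥ index
      · have h1 : ¬ (index - run > 0) := by omega
        simp [pvFindK, pvKOf, h, h1]
      · have h2 : index - run > 0 := by omega
        have h3 : index - (run + (s.length : Int)) = index - run - (s.length : Int) := by ring
        simp [pvFindK, pvKOf, h, h2, ih, h3]

-- ===== VERDICT (by name: the statement is the Claim_ definition above) =====
theorem divideSentences_spec : Claim_equal_divideSentences := by
  intro sentences _
  unfold Spec_divideSentences divideSentences divideSentences_alt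
  simp only [pvCountA_eq, pvSplitA_eq_kOf, pvFindK_eq_kOf]
  norm_num
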